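-- pv_equiv track=rewrite | github.com/adhithyan15/coding-adventures | code/programs/python/unix-tools/tr_tool.py | tr_squeeze_only
-- ===== SOURCE A (Python) =====
-- def tr_squeeze_only(text: str, set1_chars: str) -> str:
--     """Squeeze repeated characters in set1.
--
--     Without translation or deletion, ``-s`` alone squeezes runs of
--     characters from set1.
--
--     Args:
--         text: The input text.
--         set1_chars: Characters to squeeze.
--
--     Returns:
--         The text with squeezed characters.
--     """
--     squeeze_chars = set(set1_chars)
--     result: list[str] = []
--     prev_char = ""
--
--     for ch in text:
--         if ch in squeeze_chars and ch == prev_char: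
--             continue
--         result.append(ch)
--         prev_char = ch
--
--     return "".join(result)
-- ===== SOURCE B (Python) =====
-- def tr_squeeze_only(text: str, set1_chars: str) -> str:
--     """Squeeze repeated characters in set1 (run-based two-pointer scan)."""
--     squeeze = set(set1_chars)
--     pieces = []
--     i, n = 0, len(text)
--     while i < n:
--         ch = text[i]
--         j = i + 1
--         while j < n and text[j] == ch:
--             j += 1
--         pieces.append(ch if ch in squeeze else text[i:j])
--         i = j
--     return "".join(pieces)
-- ===== Notes on version B (the rewrite author's own statement) =====
-- stated objective: alternative
-- what changed: B partitions the text into maximal runs of identical characters with a two-pointer scan and emits each run either whole or collapsed to one character, instead of A's character-by-character loop with a prev_char sentinel.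
import Mathlib
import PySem

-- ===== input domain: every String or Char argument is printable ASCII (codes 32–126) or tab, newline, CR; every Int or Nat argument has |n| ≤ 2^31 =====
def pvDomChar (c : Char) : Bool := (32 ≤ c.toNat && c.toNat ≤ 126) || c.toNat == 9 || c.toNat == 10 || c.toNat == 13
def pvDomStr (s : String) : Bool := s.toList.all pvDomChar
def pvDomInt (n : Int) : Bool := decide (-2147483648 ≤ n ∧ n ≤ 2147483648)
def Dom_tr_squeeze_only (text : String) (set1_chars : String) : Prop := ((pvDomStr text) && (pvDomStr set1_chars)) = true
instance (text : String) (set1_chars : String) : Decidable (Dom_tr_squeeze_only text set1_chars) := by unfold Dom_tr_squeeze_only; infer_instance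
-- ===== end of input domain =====

-- B replaces A's prev_char sentinel loop by a run-based scan (find each maximal run, emit it whole or collapsed); alternative decomposition, same cost.

-- ===== PORT A =====
-- A: one pass with accumulator `result` and sentinel `prev_char` (ported as a List Char, [] = "").
def tr_squeeze_only (text : String) (set1_chars : String) : String :=
  let squeeze : PySem.Set Char := PySem.Set.ofList set1_chars.toList
  let st :=
    text.toList.foldl
      (fun (st : List Char × List Char) ch =>
        if squeeze.contains ch && st.2 == [ch] then st
        else (st.1 ++ [ch], [ch]))
      ([], [])
  String.mk st.1

-- ===== PORT B =====
-- B: split off each maximal run (inner while j scan = takeWhile/dropWhile), emit one char if squeezed, else the whole run.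
def pvAltRuns (squeeze : PySem.Set Char) : List Char → List Char
  | [] => []
  | c :: rest =>
    (if squeeze.contains c then [c] else c :: rest.takeWhile (· == c))
      ++ pvAltRuns squeeze (rest.dropWhile (· == c))
termination_by l => l.length
decreasing_by
  simp only [List.length_cons]
  exact Nat.lt_succ_of_le (List.length_dropWhile_le _ _)

def tr_squeeze_only_alt (text : String) (set1_chars : String) : String :=
  String.mk (pvAltRuns (PySem.Set.ofList set1_chars.toList) text.toList)

-- ===== PRECONDITION & SPEC =====
def Spec_tr_squeeze_only (text : String) (set1_chars : String) (out : String) : Prop := out = tr_squeeze_only_alt text set1_chars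
instance (text : String) (set1_chars : String) (out : String) : Decidable (Spec_tr_squeeze_only text set1_chars out) := by unfold Spec_tr_squeeze_only; infer_instance

-- ===== CLAIM (what is proved, stated in full; the proofs are below) =====
def Claim_equal_tr_squeeze_only : Prop := ∀ (text : String) (set1_chars : String), Dom_tr_squeeze_only text set1_chars → Spec_tr_squeeze_only text set1_chars (tr_squeeze_only text set1_chars)

-- ===== LEMMAS AND PROOFS =====

-- A's loop, with prev_char made an explicit parameter (proof-side reference function).
def pvG (sq : PySem.Set Char) (prev : List Char) : List Char → List Char
  | [] => []
  | c :: rest => if sq.contains c && prev == [c] then pvG sq prev rest else c :: pvG sq [c] rest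

theorem pvFoldl_eq_pvG (sq : PySem.Set Char) (l : List Char) :
    ∀ (res prev : List Char),
      (l.foldl (fun (st : List Char × List Char) ch =>
          if sq.contains ch && st.2 == [ch] then st else (st.1 ++ [ch], [ch])) (res, prev)).1
        = res ++ pvG sq prev l := by
  induction l with
  | nil => intro res prev; simp [pvG]
  | cons c rest ih =>
    intro res prev
    simp only [List.foldl_cons, pvG]
    by_cases h : (sq.contains c && prev == [c]) = true
    · rw [if_pos h, if_pos h, ih]
    · rw [if_neg h, if_neg h, ih]
      simp

-- while prev is the squeezed char, further copies of it are skipped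
theorem pvG_skip (sq : PySem.Set Char) (c : Char) (hc : c ∈ sq) (l : List Char) :
    pvG sq [c] l = pvG sq [c] (l.dropWhile (· == c)) := by
  induction l with
  | nil => rfl
  | cons d rest ih =>
    by_cases hd : d = c
    · subst hd
      simp [pvG, hc, ih]
    · simp [pvG, Ne.symm hd, hd]

-- prev = [c] behaves like prev = [] when c is not squeezed
theorem pvG_prev_not_squeezed (sq : PySem.Set Char) (c : Char) (hc : c ∉ sq) (l : List Char) :
    pvG sq [c] l = pvG sq [] l := by
  cases l with
  | nil => rfl
  | cons d rest =>
    by_cases hd : d = c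
    · subst hd; simp [pvG, hc]
    · simp [pvG, Ne.symm hd]

-- prev = [c] behaves like prev = [] when the next char is not c
theorem pvG_prev_mismatch (sq : PySem.Set Char) (c : Char) (l : List Char)
    (h : ∀ d, l.head? = some d → d ≠ c) : pvG sq [c] l = pvG sq [] l := by
  cases l with
  | nil => rfl
  | cons d rest =>
    have hd : d ≠ c := h d rfl
    simp [pvG, Ne.symm hd]

-- a run of an unsqueezed char passes through unchanged
theorem pvG_run (sq : PySem.Set Char) (c : Char) (hc : c ∉ sq) :
    ∀ (w rest : List Char), (∀ x ∈ w, x = c) → pvG sq [] (w ++ rest) = w ++ pvG sq [] rest := by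
  intro w
  induction w with
  | nil => intro rest _; rfl
  | cons d w' ih =>
    intro rest hw
    have hd : d = c := hw d (by simp)
    subst hd
    have : pvG sq [] (d :: (w' ++ rest)) = d :: pvG sq [d] (w' ++ rest) := by
      simp [pvG]
    rw [List.cons_append, this, pvG_prev_not_squeezed sq d hc,
        ih rest (fun x hx => hw x (by simp [hx]))]
    rfl

theorem pvG_eq_pvAltRuns (sq : PySem.Set Char) (l : List Char) :
    pvG sq [] l = pvAltRuns sq l := by
  fun_induction pvAltRuns sq l with
  | case1 => rfl
  | case2 c rest ih =>
    have h1 : pvG sq [] (c :: rest) = c :: pvG sq [c] rest := by simp [pvG]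
    by_cases hc : c ∈ sq
    · rw [if_pos (by simpa using hc), h1, pvG_skip sq c hc rest,
          pvG_prev_mismatch sq c _ (by
            intro d hd heq
            have h2 := List.head?_dropWhile_not (· == c) rest
            rw [hd] at h2
            simp at h2
            exact h2 heq),
          ih]
      rfl
    · rw [if_neg (by simpa using hc), h1, pvG_prev_not_squeezed sq c hc]
      conv_lhs => rw [← List.takeWhile_append_dropWhile (p := (· == c)) (l := rest)]
      rw [pvG_run sq c hc _ _ (fun x hx => by simpa using List.mem_takeWhile_imp hx), ih]
      rfl

-- ===== VERDICT (by name: the statement is the Claim_ definition above) =====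
theorem tr_squeeze_only_spec : Claim_equal_tr_squeeze_only := by
  intro text set1_chars _
  unfold Spec_tr_squeeze_only tr_squeeze_only tr_squeeze_only_alt
  simp only []
  rw [pvFoldl_eq_pvG, pvG_eq_pvAltRuns]
  rfl
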